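-- pv_equiv track=rewrite | github.com/jxstnVm/nVm.github.io | webapps/hw2_sketch.py | system1
-- ===== SOURCE A (Python) =====
-- def generate1(symbol1):
--     if symbol1 == "X":
--         return "F[+X]F[+X]+F[-X]+X"
--     elif symbol1 == "F":
--         return "FF"
--     elif symbol1 == "+":
--         return "+"
--     elif symbol1 == "-":
--         return "-"
--     elif symbol1 == "[":
--         return "["
--     elif symbol1 == "]":
--         return "]"
--
-- def system1(current_iteration1, max_iterations, axiom1):
--     current_iteration1 += 1
--     new_axiom1 = ""
--     for symbol1 in axiom1:
--         new_axiom1 += generate1(symbol1)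
--     if current_iteration1 >= max_iterations:
--         return new_axiom1
--     else:
--         return system1(current_iteration1, max_iterations, new_axiom1)
-- ===== SOURCE B (Python) =====
-- def generate1(symbol1):
--     if symbol1 == "X":
--         return "F[+X]F[+X]+F[-X]+X"
--     elif symbol1 == "F":
--         return "FF"
--     elif symbol1 == "+":
--         return "+"
--     elif symbol1 == "-":
--         return "-"
--     elif symbol1 == "[":
--         return "["
--     elif symbol1 == "]":
--         return "]"
--
-- def system1(current_iteration1, max_iterations, axiom1):
--     for _ in range(max(1, max_iterations - current_iteration1)):
--         axiom1 = "".join(generate1(s) for s in axiom1)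
--     return axiom1
-- ===== Notes on version B (the rewrite author's own statement) =====
-- stated objective: simpler
-- what changed: Replaces the tail recursion with a plain loop: the number of expansion passes max(1, max_iterations - current_iteration1) is computed up front and each pass rewrites the axiom with ''.join(generate1(s) for s in axiom1) instead of += concatenation.
import Mathlib
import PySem

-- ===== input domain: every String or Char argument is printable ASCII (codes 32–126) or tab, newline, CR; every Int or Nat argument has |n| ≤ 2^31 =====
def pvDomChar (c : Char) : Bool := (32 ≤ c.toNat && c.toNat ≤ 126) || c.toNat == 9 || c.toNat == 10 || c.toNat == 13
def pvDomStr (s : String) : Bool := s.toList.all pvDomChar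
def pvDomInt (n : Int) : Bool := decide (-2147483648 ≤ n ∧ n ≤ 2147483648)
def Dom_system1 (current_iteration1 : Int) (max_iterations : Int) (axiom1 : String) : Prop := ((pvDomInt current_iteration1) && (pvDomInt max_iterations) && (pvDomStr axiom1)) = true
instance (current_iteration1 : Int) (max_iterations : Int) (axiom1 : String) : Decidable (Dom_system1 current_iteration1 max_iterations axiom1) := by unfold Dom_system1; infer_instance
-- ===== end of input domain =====

-- B replaces A's tail recursion by a counted loop (max(1, max-cur) join-based passes); objective: simpler.

-- ===== PORT A =====
-- generate1: shared symbol table of both Pythons. The Python returns None on an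
-- unknown symbol (and system1 then raises TypeError); Pre_system1 excludes such
-- inputs, so the port returns "" there (never reached under Pre_).
def generate1 (c : Char) : List Char :=
  if c = 'X' then "F[+X]F[+X]+F[-X]+X".toList
  else if c = 'F' then "FF".toList
  else if c = '+' then "+".toList
  else if c = '-' then "-".toList
  else if c = '[' then "[".toList
  else if c = ']' then "]".toList
  else []

-- the body of A's for loop: new_axiom1 += generate1(symbol1), over List Char
def system1Core (current_iteration1 : Int) (max_iterations : Int) (axiom1 : List Char) : List Char :=
  let cur := current_iteration1 + 1
  let newAxiom := axiom1.foldl (fun acc c => acc ++ generate1 c) []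
  if cur ≥ max_iterations then newAxiom
  else system1Core cur max_iterations newAxiom
termination_by (max_iterations - current_iteration1).toNat
decreasing_by omega

def system1 (current_iteration1 : Int) (max_iterations : Int) (axiom1 : String) : String :=
  String.ofList (system1Core current_iteration1 max_iterations axiom1.toList)

-- ===== PORT B =====
-- one pass of B: ''.join(generate1(s) for s in axiom1)
def expandB (axiom1 : List Char) : List Char := (axiom1.map generate1).flatten

def system1_alt (current_iteration1 : Int) (max_iterations : Int) (axiom1 : String) : String :=
  String.ofList ((List.range (max 1 (max_iterations - current_iteration1)).toNat).foldl
    (fun acc _ => expandB acc) axiom1.toList)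

-- ===== PRECONDITION & SPEC =====
-- Pre_ excludes exactly the axioms with a symbol outside "XF+-[]": there Python's
-- generate1 returns None and A raises TypeError on the string concatenation.
def Pre_system1 (current_iteration1 : Int) (max_iterations : Int) (axiom1 : String) : Prop :=
  (axiom1.toList.all (fun c => c == 'X' || c == 'F' || c == '+' || c == '-' || c == '[' || c == ']')) = true
instance (current_iteration1 : Int) (max_iterations : Int) (axiom1 : String) : Decidable (Pre_system1 current_iteration1 max_iterations axiom1) := by unfold Pre_system1; infer_instance

def pvWitness_system1 : Int × Int × String := (0, 3, "X+F")

def Spec_system1 (current_iteration1 : Int) (max_iterations : Int) (axiom1 : String) (out : String) : Prop := out = system1_alt current_iteration1 max_iterations axiom1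
instance (current_iteration1 : Int) (max_iterations : Int) (axiom1 : String) (out : String) : Decidable (Spec_system1 current_iteration1 max_iterations axiom1 out) := by unfold Spec_system1; infer_instance

-- ===== CLAIM (what is proved, stated in full; the proofs are below) =====
def Claim_equal_system1 : Prop := ∀ (current_iteration1 : Int) (max_iterations : Int) (axiom1 : String), Dom_system1 current_iteration1 max_iterations axiom1 → Pre_system1 current_iteration1 max_iterations axiom1 → Spec_system1 current_iteration1 max_iterations axiom1 (system1 current_iteration1 max_iterations axiom1)

-- ===== LEMMAS AND PROOFS =====

-- one pass of A = one pass of B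
theorem expandA_eq (l : List Char) :
    l.foldl (fun acc c => acc ++ generate1 c) [] = expandB l := by
  rw [PySem.List.foldl_append_eq_flatMap]
  simp [expandB, List.flatMap_def]

theorem iter_succ (n : ℕ) (l : List Char) :
    (List.range (n + 1)).foldl (fun acc _ => expandB acc) l
      = (List.range n).foldl (fun acc _ => expandB acc) (expandB l) := by
  rw [List.range_succ_eq_map]
  simp [List.foldl_map]

theorem core_eq (fuel : ℕ) : ∀ (cur mx : Int), (mx - cur).toNat ≤ fuel → ∀ (l : List Char),
    system1Core cur mx l
      = (List.range (max 1 (mx - cur)).toNat).foldl (fun acc _ => expandB acc) l := by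
  induction fuel with
  | zero =>
    intro cur mx h l
    rw [system1Core]
    have hle : cur + 1 ≥ mx := by omega
    have : (max 1 (mx - cur)).toNat = 1 := by omega
    simp [hle, this, expandB]
  | succ n ih =>
    intro cur mx h l
    rw [system1Core]
    by_cases hge : cur + 1 ≥ mx
    · have : (max 1 (mx - cur)).toNat = 1 := by omega
      simp [hge, this, expandB]
    · have hk : (max 1 (mx - cur)).toNat = (max 1 (mx - (cur + 1))).toNat + 1 := by omega
      have hfuel : (mx - (cur + 1)).toNat ≤ n := by omega
      simp only [hge, if_false]
      rw [ih (cur + 1) mx hfuel, hk, iter_succ, expandA_eq]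

-- ===== VERDICT (by name: the statement is the Claim_ definition above) =====
theorem system1_spec : Claim_equal_system1 := by
  intro cur mx ax _ _
  unfold Spec_system1 system1 system1_alt
  rw [core_eq (mx - cur).toNat cur mx le_rfl]
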